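-- pv_equiv track=rewrite | github.com/korrenhannes/website | Backend/test.py | final_segments
-- ===== SOURCE A (Python) =====
-- def final_segments(dur, silent_segments):
--     complementary_ranges = []
--     current_start = 0
--
--     for exclude_start, exclude_end in silent_segments:
--         # Add the range before the excluded range
--         if exclude_start > current_start:
--             complementary_ranges.append((current_start, exclude_start))
--
--         # Update the current start to the end of the excluded range
--         current_start = exclude_end
--
--     # Add the range after the last excluded range
--     if current_start < dur:
--         complementary_ranges.append((current_start, dur))
--
--     return complementary_ranges
-- ===== SOURCE B (Python) =====
-- def final_segments(dur, silent_segments):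
--     # Build the flat boundary sequence 0, s1, e1, s2, e2, ..., dur and take
--     # consecutive pairs; the even-positioned pairs are exactly the gaps,
--     # kept only when non-empty (a < b).
--     points = [0]
--     for s, e in silent_segments:
--         points.append(s)
--         points.append(e)
--     points.append(dur)
--     it = iter(points)
--     return [(a, b) for a, b in zip(it, it) if a < b]
-- ===== Notes on version B (the rewrite author's own statement) =====
-- stated objective: idiomatic
-- what changed: Instead of a stateful sweep carrying current_start and emitting gap ranges conditionally, B builds one flat boundary list [0, s1, e1, ..., dur] and pairs consecutive elements with zip(it, it), keeping only pairs with a < b.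
import Mathlib
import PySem

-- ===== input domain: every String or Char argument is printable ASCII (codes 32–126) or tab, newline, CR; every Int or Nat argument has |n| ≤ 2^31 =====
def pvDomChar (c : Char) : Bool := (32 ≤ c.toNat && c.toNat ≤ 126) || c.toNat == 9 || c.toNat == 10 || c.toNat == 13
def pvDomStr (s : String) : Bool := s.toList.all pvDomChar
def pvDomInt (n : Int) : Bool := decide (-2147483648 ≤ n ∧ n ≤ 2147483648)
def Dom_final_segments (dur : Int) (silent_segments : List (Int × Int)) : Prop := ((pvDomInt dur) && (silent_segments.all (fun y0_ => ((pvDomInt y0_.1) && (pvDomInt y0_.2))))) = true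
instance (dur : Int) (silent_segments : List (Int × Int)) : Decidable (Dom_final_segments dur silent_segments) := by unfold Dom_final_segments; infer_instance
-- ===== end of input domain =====

-- B replaces A's stateful sweep by a flat boundary list paired two at a time (idiomatic rewrite; same cost).

-- ===== PORT A =====
def final_segments (dur : Int) (silent_segments : List (Int × Int)) : List (Int × Int) :=
  let r := silent_segments.foldl
    (fun (st : List (Int × Int) × Int) seg =>
      (if seg.1 > st.2 then st.1 ++ [(st.2, seg.1)] else st.1, seg.2))
    ([], 0)
  if r.2 < dur then r.1 ++ [(r.2, dur)] else r.1

-- ===== PORT B =====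
-- zip(it, it) over one iterator pairs consecutive elements; ported exactly as a
-- two-at-a-time structural recursion.
def pvPairUp : List Int → List (Int × Int)
  | a :: b :: rest => (a, b) :: pvPairUp rest
  | _ => []

def final_segments_alt (dur : Int) (silent_segments : List (Int × Int)) : List (Int × Int) :=
  let points := silent_segments.foldl (fun acc seg => acc ++ [seg.1, seg.2]) [0] ++ [dur]
  (pvPairUp points).filter (fun p => p.1 < p.2)

-- ===== PRECONDITION & SPEC =====
def Spec_final_segments (dur : Int) (silent_segments : List (Int × Int)) (out : List (Int × Int)) : Prop := out = final_segments_alt dur silent_segments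
instance (dur : Int) (silent_segments : List (Int × Int)) (out : List (Int × Int)) : Decidable (Spec_final_segments dur silent_segments out) := by unfold Spec_final_segments; infer_instance

-- ===== CLAIM (what is proved, stated in full; the proofs are below) =====
def Claim_equal_final_segments : Prop := ∀ (dur : Int) (silent_segments : List (Int × Int)), Dom_final_segments dur silent_segments → Spec_final_segments dur silent_segments (final_segments dur silent_segments)

-- ===== LEMMAS AND PROOFS =====

-- B's boundary-building loop, flattened.
lemma points_foldl_eq (segs : List (Int × Int)) (init : List Int) :
    segs.foldl (fun acc seg => acc ++ [seg.1, seg.2]) init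
      = init ++ segs.flatMap (fun seg => [seg.1, seg.2]) := by
  induction segs generalizing init with
  | nil => simp
  | cons s rest ih => simp [List.foldl_cons, ih, List.flatMap_cons]

-- Core invariant: A's remaining sweep from state (acc, cur) equals acc followed by
-- the filtered consecutive pairs of cur :: <flattened remaining segments> ++ [dur].
lemma sweep_eq (dur : Int) (segs : List (Int × Int)) (acc : List (Int × Int)) (cur : Int) :
    (let r := segs.foldl
        (fun (st : List (Int × Int) × Int) seg =>
          (if seg.1 > st.2 then st.1 ++ [(st.2, seg.1)] else st.1, seg.2))
        (acc, cur)
     if r.2 < dur then r.1 ++ [(r.2, dur)] else r.1)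
      = acc ++ (pvPairUp (cur :: segs.flatMap (fun seg => [seg.1, seg.2]) ++ [dur])).filter
          (fun p => p.1 < p.2) := by
  induction segs generalizing acc cur with
  | nil =>
      simp only [List.foldl_nil, List.flatMap_nil, List.nil_append, List.cons_append,
        List.nil_append, pvPairUp, List.filter]
      split_ifs with h <;> simp [h]
  | cons s rest ih =>
      simp only [List.foldl_cons, List.flatMap_cons]
      rw [ih]
      by_cases h : s.1 > cur
      · simp [h, pvPairUp]
      · have h' : ¬ (cur < s.1) := h
        simp [h, pvPairUp]

-- ===== VERDICT (by name: the statement is the Claim_ definition above) =====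
theorem final_segments_spec : Claim_equal_final_segments := by
  intro dur segs _
  unfold Spec_final_segments final_segments final_segments_alt
  rw [points_foldl_eq]
  simpa using sweep_eq dur segs [] 0
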